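-- pv_equiv track=rewrite | github.com/pypi-data/pypi-mirror-385 | packages/scperturb-cmap/scperturb_cmap-0.2.0.tar.gz/scperturb_cmap-0.2.0/src/scperturb_cmap/data/preprocess.py | _unique_first_with_index
-- ===== SOURCE A (Python) =====
-- from typing import List, Sequence, Tuple
--
-- def _unique_first_with_index(seq: Sequence[str]) -> List[Tuple[str, int]]:
--     seen = set()
--     pairs: List[Tuple[str, int]] = []
--     for i, s in enumerate(seq):
--         if s not in seen:
--             seen.add(s)
--             pairs.append((s, i))
--     return pairs
-- ===== SOURCE B (Python) =====
-- from typing import List, Sequence, Tuple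
--
-- def _unique_first_with_index(seq: Sequence[str]) -> List[Tuple[str, int]]:
--     # Two-stage decomposition: build a first-index table by iterating the
--     # enumeration BACKWARDS (earlier occurrences overwrite later ones), then
--     # emit the unique elements in first-occurrence order via dict.fromkeys.
--     first = {s: i for i, s in reversed(list(enumerate(seq)))}
--     return [(s, first[s]) for s in dict.fromkeys(seq)]
-- ===== Notes on version B (the rewrite author's own statement) =====
-- stated objective: alternative
-- what changed: Replaces the single forward seen-set pass accumulating (element, index) pairs by a two-stage decomposition: a first-index table built by a dict comprehension over the REVERSED enumeration (earlier occurrences overwrite later ones), then a map over dict.fromkeys for the first-occurrence order.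
import Mathlib
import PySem

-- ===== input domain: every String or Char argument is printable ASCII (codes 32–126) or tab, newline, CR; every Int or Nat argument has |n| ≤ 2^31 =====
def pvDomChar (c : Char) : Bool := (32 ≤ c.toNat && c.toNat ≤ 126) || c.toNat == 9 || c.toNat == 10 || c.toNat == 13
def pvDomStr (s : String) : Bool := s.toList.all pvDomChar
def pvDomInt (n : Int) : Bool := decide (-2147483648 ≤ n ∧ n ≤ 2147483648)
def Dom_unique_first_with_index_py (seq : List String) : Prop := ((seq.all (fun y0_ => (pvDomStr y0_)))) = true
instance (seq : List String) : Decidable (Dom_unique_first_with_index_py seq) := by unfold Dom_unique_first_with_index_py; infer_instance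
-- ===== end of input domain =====

-- B replaces A's single forward seen-set pass accumulating (element, index) pairs by a
-- two-stage decomposition: a first-index table built over the REVERSED enumeration
-- (earlier occurrences overwrite later ones), then a map over the deduped elements.

-- ===== PORT A =====
def unique_first_with_index_py (seq : List String) : List (String × Int) :=
  ((PySem.List.enumerate seq).foldl
    (fun (st : PySem.Set String × List (String × Int)) p =>
      if st.1.contains p.2 then st else (st.1.add p.2, st.2 ++ [(p.2, p.1)]))
    (PySem.Set.empty, [])).2

-- ===== PORT B =====
-- {s: i for i, s in reversed(list(enumerate(seq)))} → foldl insert over the reversed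
-- enumeration; dict.fromkeys(seq) → PySem.List.dedup; first[s] → Dict.get?
-- (its 'none' branch is Python's KeyError, unreachable since s is drawn from seq).
def unique_first_with_index_py_alt (seq : List String) : List (String × Int) :=
  let first : PySem.Dict String Int :=
    ((PySem.List.enumerate seq).reverse).foldl
      (fun (d : PySem.Dict String Int) p => d.insert p.2 p.1) PySem.Dict.empty
  (PySem.List.dedup seq).map (fun s => (s, (first.get? s).getD 0))

-- ===== PRECONDITION & SPEC =====
def Spec_unique_first_with_index_py (seq : List String) (out : List (String × Int)) : Prop := out = unique_first_with_index_py_alt seq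
instance (seq : List String) (out : List (String × Int)) : Decidable (Spec_unique_first_with_index_py seq out) := by unfold Spec_unique_first_with_index_py; infer_instance

-- ===== CLAIM (what is proved, stated in full; the proofs are below) =====
def Claim_equal_unique_first_with_index_py : Prop := ∀ (seq : List String), Dom_unique_first_with_index_py seq → Spec_unique_first_with_index_py seq (unique_first_with_index_py seq)

-- ===== LEMMAS AND PROOFS =====

-- the index that B looks up: first index of s in xs (0 if absent, never used absent)
def idxI (xs : List String) (s : String) : Int := (((PySem.List.index? xs s).getD 0 : Nat) : Int)

-- the new (not-yet-seen) elements of xs, in first-occurrence order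
def uniqKeys : List String → PySem.Set String → List String
  | [], _ => []
  | x :: xs, seen =>
    if seen.contains x then uniqKeys xs seen else x :: uniqKeys xs (seen.add x)

lemma mem_uniqKeys {s : String} (xs : List String) (seen : PySem.Set String)
    (h : s ∈ uniqKeys xs seen) : s ∈ xs ∧ ¬ seen.contains s := by
  induction xs generalizing seen with
  | nil => simp [uniqKeys] at h
  | cons x xs ih =>
    rw [uniqKeys] at h
    by_cases hc : seen.contains x = true
    · rw [if_pos hc] at h
      obtain ⟨h1, h2⟩ := ih seen h
      exact ⟨List.mem_cons_of_mem _ h1, h2⟩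
    · rw [if_neg hc, List.mem_cons] at h
      rcases h with h | h
      · subst h
        exact ⟨by simp, by simpa using hc⟩
      · obtain ⟨h1, h2⟩ := ih (seen.add x) h
        refine ⟨List.mem_cons_of_mem _ h1, fun hs => h2 ?_⟩
        rw [PySem.Set.contains_iff] at hs ⊢
        exact (PySem.Set.mem_add _ _ _).mpr (Or.inl hs)

lemma uniqKeys_ne {s : String} {x : String} (xs : List String) (seen : PySem.Set String)
    (h : s ∈ uniqKeys xs (seen.add x)) : s ≠ x := by
  intro he
  obtain ⟨_, h2⟩ := mem_uniqKeys xs (seen.add x) h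
  exact h2 (by rw [PySem.Set.contains_iff, he]; exact (PySem.Set.mem_add _ _ _).mpr (Or.inr rfl))

-- A's loop described recursively
def fRec : List String → PySem.Set String → Int → List (String × Int)
  | [], _, _ => []
  | x :: xs, seen, n =>
    if seen.contains x then fRec xs seen (n + 1)
    else (x, n) :: fRec xs (seen.add x) (n + 1)

lemma foldl_eq_fRec (xs : List String) (seen : PySem.Set String)
    (pairs : List (String × Int)) (n : Int) :
    ((PySem.List.enumerate xs n).foldl
      (fun (st : PySem.Set String × List (String × Int)) p =>
        if st.1.contains p.2 then st else (st.1.add p.2, st.2 ++ [(p.2, p.1)]))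
      (seen, pairs)).2 = pairs ++ fRec xs seen n := by
  induction xs generalizing seen pairs n with
  | nil => simp [PySem.List.enumerate_nil, fRec]
  | cons x xs ih =>
    rw [PySem.List.enumerate_cons]
    simp only [List.foldl_cons]
    by_cases h : seen.contains x = true
    · rw [if_pos h, fRec, if_pos h]
      exact ih seen pairs (n + 1)
    · rw [if_neg h, fRec, if_neg h]
      rw [ih (seen.add x) (pairs ++ [(x, n)]) (n + 1), List.append_assoc]
      rfl

lemma idxI_cons_self (x : String) (xs : List String) : idxI (x :: xs) x = 0 := by
  rw [idxI, PySem.List.index?_cons_self]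
  simp

lemma idxI_cons_of_ne {x s : String} (xs : List String) (hne : x ≠ s) (hmem : s ∈ xs) :
    idxI (x :: xs) s = idxI xs s + 1 := by
  have h1 := PySem.List.index?_cons_of_ne (v := s) (xs := xs) hne
  obtain ⟨k, hk⟩ := Option.isSome_iff_exists.mp
    ((PySem.List.index?_isSome_iff (xs := xs) (v := s)).mpr hmem)
  rw [idxI, idxI, h1, hk]
  simp

lemma fRec_eq_map (xs : List String) (seen : PySem.Set String) (n : Int) :
    fRec xs seen n = (uniqKeys xs seen).map (fun s => (s, n + idxI xs s)) := by
  induction xs generalizing seen n with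
  | nil => simp [fRec, uniqKeys]
  | cons x xs ih =>
    rw [fRec, uniqKeys]
    by_cases h : seen.contains x = true
    · rw [if_pos h, if_pos h, ih seen (n + 1)]
      refine List.map_congr_left (fun s hs => ?_)
      obtain ⟨hmem, hns⟩ := mem_uniqKeys xs seen hs
      have hne : x ≠ s := fun he => hns (he ▸ h)
      rw [idxI_cons_of_ne xs hne hmem]
      simp; ring
    · rw [if_neg h, if_neg h, ih (seen.add x) (n + 1), List.map_cons, idxI_cons_self]
      congr 1
      · simp
      · refine List.map_congr_left (fun s hs => ?_)
        have hne : x ≠ s := fun he => uniqKeys_ne xs seen hs he.symm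
        obtain ⟨hmem, _⟩ := mem_uniqKeys xs (seen.add x) hs
        rw [idxI_cons_of_ne xs hne hmem]
        simp; ring

lemma foldl_add_eq_uniqKeys (xs : List String) (acc : PySem.Set String) :
    xs.foldl PySem.Set.add acc = acc ++ uniqKeys xs acc := by
  induction xs generalizing acc with
  | nil => simp [uniqKeys]
  | cons x xs ih =>
    rw [List.foldl_cons, uniqKeys]
    by_cases h : acc.contains x = true
    · rw [if_pos h]
      have : PySem.Set.add acc x = acc := by rw [PySem.Set.add, if_pos h]
      rw [this, ih acc]
    · rw [if_neg h]
      have hadd : PySem.Set.add acc x = acc ++ [x] := by rw [PySem.Set.add, if_neg h]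
      rw [hadd, ih (acc ++ [x]), List.append_assoc]
      simp

lemma dedup_eq_uniqKeys (xs : List String) :
    PySem.List.dedup xs = uniqKeys xs PySem.Set.empty := by
  rw [PySem.List.dedup_eq_ofList, PySem.Set.ofList_eq_foldl]
  exact (foldl_add_eq_uniqKeys xs PySem.Set.empty).trans (List.nil_append _)

lemma get?_revfold (xs : List String) (n : Int) (d : PySem.Dict String Int) (s : String) :
    (((PySem.List.enumerate xs n).reverse.foldl
      (fun (d : PySem.Dict String Int) p => d.insert p.2 p.1) d).get? s)
    = if s ∈ xs then some (n + idxI xs s) else d.get? s := by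
  induction xs generalizing n d with
  | nil => simp [PySem.List.enumerate_nil]
  | cons x xs ih =>
    rw [PySem.List.enumerate_cons, List.reverse_cons, List.foldl_append]
    simp only [List.foldl_cons, List.foldl_nil]
    by_cases he : s = x
    · subst he
      rw [PySem.Dict.get?_insert_self, if_pos (by simp), idxI_cons_self]
      simp
    · rw [PySem.Dict.get?_insert, if_neg he, ih (n + 1) d]
      by_cases hm : s ∈ xs
      · rw [if_pos hm, if_pos (List.mem_cons_of_mem _ hm),
          idxI_cons_of_ne xs (fun hxe => he hxe.symm) hm]
        congr 1
        ring
      · rw [if_neg hm, if_neg (by simp [he, hm])]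

-- ===== VERDICT (by name: the statement is the Claim_ definition above) =====
theorem unique_first_with_index_py_spec : Claim_equal_unique_first_with_index_py := by
  intro seq _
  show _ = _
  rw [unique_first_with_index_py, unique_first_with_index_py_alt]
  rw [foldl_eq_fRec seq PySem.Set.empty [] 0, List.nil_append,
    fRec_eq_map, dedup_eq_uniqKeys]
  refine List.map_congr_left (fun s hs => ?_)
  have hmem : s ∈ seq := (mem_uniqKeys seq PySem.Set.empty hs).1
  rw [get?_revfold seq 0 PySem.Dict.empty s, if_pos hmem]
  simp
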